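-- pv_equiv track=rewrite | github.com/Loofy147/Global-theorem- | research/m6_k4_search.py | _build_sa
-- ===== SOURCE A (Python) =====
-- from itertools import permutations, product as iprod
--
-- def _build_sa(m: int, k: int=3):
--     n = m**k
--     arc_s = [[0]*k for _ in range(n)]
--     m_pow = [m**i for i in range(k)]
--     m_pow.reverse()
--     for idx in range(n):
--         for c in range(k):
--             if (idx // m_pow[c]) % m == m - 1:
--                 arc_s[idx][c] = idx - (m - 1) * m_pow[c]
--             else:
--                 arc_s[idx][c] = idx + m_pow[c]
--     all_p = [list(p) for p in permutations(range(k))]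
--     pa = [[None]*k for _ in range(len(all_p))]
--     for pi,p in enumerate(all_p):
--         for at,c in enumerate(p): pa[pi][c] = at
--     return n, arc_s, pa, all_p
-- ===== SOURCE B (Python) =====
-- from itertools import permutations
--
-- def _build_sa(m: int, k: int=3):
--     # Build the arc table recursively digit by digit: the k-digit table is m
--     # stacked, shifted copies of the (k-1)-digit table, each row prefixed with
--     # the increment-mod-m successor of the new leading digit.  No index is ever
--     # decoded with floor-division.
--     if m < 0:
--         raise ValueError("alphabet size m must be nonnegative")
--     arc_s = [[]]
--     size = 1  # m ** (digits built so far)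
--     for _ in range(k):
--         arc_s = [[((d + 1) % m) * size + r] + [d * size + x for x in row]
--                  for d in range(m)
--                  for r, row in enumerate(arc_s)]
--         size *= m
--     all_p = [list(p) for p in permutations(range(k))]
--     pa = [[p.index(c) for c in range(k)] for p in all_p]
--     return size, arc_s, pa, all_p
-- ===== Notes on version B (the rewrite author's own statement) =====
-- stated objective: alternative
-- what changed: The arc table is built bottom-up by a recurrence on the number of digits -- the j+1-digit table is m stacked shifted copies of the j-digit table, each row prefixed with the successor of the new leading digit -- instead of decoding every digit of every index with floor-division and modulo; the permutation-inverse rows are computed by p.index(c) searches instead of enumerate-and-scatter into a preallocated row.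
-- outside the precondition, e.g. on _build_sa(-1, 2): A returns (1, [[-1, 1]], [[0, 1], [1, 0]], [[0, 1], [1, 0]]), B raises ValueError
import Mathlib
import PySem

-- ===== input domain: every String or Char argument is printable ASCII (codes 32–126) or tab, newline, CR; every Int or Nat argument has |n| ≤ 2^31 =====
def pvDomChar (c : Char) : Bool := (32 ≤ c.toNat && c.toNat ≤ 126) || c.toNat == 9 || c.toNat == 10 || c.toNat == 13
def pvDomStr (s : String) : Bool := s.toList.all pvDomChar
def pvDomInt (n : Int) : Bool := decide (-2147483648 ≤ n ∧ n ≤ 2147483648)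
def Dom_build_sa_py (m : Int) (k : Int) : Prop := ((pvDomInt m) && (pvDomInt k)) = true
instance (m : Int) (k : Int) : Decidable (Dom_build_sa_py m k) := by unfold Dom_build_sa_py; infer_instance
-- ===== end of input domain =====

-- B builds the arc table bottom-up by a recurrence on the number of digits (m stacked,
-- shifted copies of the smaller table) instead of decoding digits with floor-division,
-- and fills each permutation-inverse row by index searches (objective: alternative).

-- ===== PORT A =====
-- itertools.permutations(range(k)) is PySem.List.permutations xs xs.length.
-- m**k: Pre_ requires 0 ≤ k, so k.toNat is exact there.
def build_sa_py (m : Int) (k : Int) : Int × List (List Int) × List (List Int) × List (List Int) :=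
  let n : Int := m ^ k.toNat
  let m_pow : List Int := ((PySem.List.pyRange 0 k 1).map (fun i => m ^ i.toNat)).reverse
  let arc_s : List (List Int) :=
    (PySem.List.pyRange 0 n 1).map (fun idx =>
      (PySem.List.pyRange 0 k 1).map (fun c =>
        let p := PySem.List.pyGetD m_pow c 0
        if PySem.Int.mod (PySem.Int.floordiv idx p) m = m - 1 then idx - (m - 1) * p
        else idx + p))
  let rng := PySem.List.pyRange 0 k 1
  let all_p : List (List Int) := PySem.List.permutations rng rng.length
  -- Python initialises the pa rows with None; every cell is overwritten (each p is a
  -- permutation of range(k)), so the 0 initialiser used here never reaches the result.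
  let pa : List (List Int) :=
    all_p.map (fun p =>
      (PySem.List.enumerate p 0).foldl (fun row ac => PySem.List.pySetD row ac.2 ac.1)
        (List.replicate k.toNat 0))
  (n, arc_s, pa, all_p)

-- ===== PORT B =====
def build_sa_py_alt (m : Int) (k : Int) : Int × List (List Int) × List (List Int) × List (List Int) :=
  -- 'if m < 0: raise ValueError': Python B raises here (outside Pre_); the port returns a default
  if m < 0 then (0, [], [], []) else
  let st := (PySem.List.pyRange 0 k 1).foldl
    (fun st _ =>
      ((PySem.List.pyRange 0 m 1).flatMap (fun d =>
        (PySem.List.enumerate st.1 0).map (fun rrow =>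
          (PySem.Int.mod (d + 1) m * st.2 + rrow.1) :: rrow.2.map (fun x => d * st.2 + x))),
       st.2 * m))
    ([([] : List Int)], (1 : Int))
  let rng := PySem.List.pyRange 0 k 1
  let all_p : List (List Int) := PySem.List.permutations rng rng.length
  -- p.index(c) always succeeds (p is a permutation of range(k)), so the ValueError
  -- branch of list.index never fires; the 0 default is unreachable.
  let pa : List (List Int) :=
    all_p.map (fun p => rng.map (fun c => (((PySem.List.index? p c).getD 0 : Nat) : Int)))
  (st.2, st.1, pa, all_p)

-- ===== PRECONDITION & SPEC =====
-- Pre_ excludes k < 0, where A always raises (m**k is a float, so range() raises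
-- TypeError; for m = 0 a ZeroDivisionError), and restricts to the natural domain
-- 0 ≤ m of an alphabet size: for m < 0 A still returns a table of floor-division
-- values decoded from the negative base, where B raises ValueError (see claim.json cites).
def Pre_build_sa_py (m : Int) (k : Int) : Prop := 0 ≤ m ∧ 0 ≤ k
instance (m : Int) (k : Int) : Decidable (Pre_build_sa_py m k) := by unfold Pre_build_sa_py; infer_instance
def pvWitness_build_sa_py : Int × Int := (2, 2)
def Spec_build_sa_py (m : Int) (k : Int) (out : Int × List (List Int) × List (List Int) × List (List Int)) : Prop := out = build_sa_py_alt m k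
instance (m : Int) (k : Int) (out : Int × List (List Int) × List (List Int) × List (List Int)) : Decidable (Spec_build_sa_py m k out) := by unfold Spec_build_sa_py; infer_instance

-- ===== CLAIM (what is proved, stated in full; the proofs are below) =====
def Claim_equal_build_sa_py : Prop := ∀ (m : Int) (k : Int), Dom_build_sa_py m k → Pre_build_sa_py m k → Spec_build_sa_py m k (build_sa_py m k)

-- ===== LEMMAS AND PROOFS =====

-- The arc row A computes for state idx of a K-digit machine over alphabet M.
def pvRowA (M K idx : Nat) : List Int :=
  (List.range K).map (fun c =>
    if idx / M ^ (K - 1 - c) % M = M - 1 then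
      (idx : Int) - ((M : Int) - 1) * (M : Int) ^ (K - 1 - c)
    else (idx : Int) + (M : Int) ^ (K - 1 - c))

theorem pv_mpow_eq (m k : Int) :
    ((PySem.List.pyRange 0 k 1).map (fun i => m ^ i.toNat)).reverse
      = (PySem.List.pyRange 0 k 1).map (fun i => m ^ (k - 1 - i).toNat) := by
  apply List.ext_getElem
  · simp
  · intro j h1 h2
    simp only [List.length_reverse, List.length_map, PySem.List.length_pyRange_one] at h1 h2
    rw [List.getElem_reverse, List.getElem_map, List.getElem_map,
      PySem.List.getElem_pyRange_one, PySem.List.getElem_pyRange_one]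
    congr 2
    simp only [List.length_map, PySem.List.length_pyRange_one]
    omega

-- A's arc table is the list of pvRowA rows.
theorem pv_arcA_eq (M K : Nat) :
    (PySem.List.pyRange 0 ((M ^ K : Nat) : Int) 1).map (fun idx =>
        (PySem.List.pyRange 0 (K : Int) 1).map (fun c =>
          let p := PySem.List.pyGetD
            (((PySem.List.pyRange 0 (K : Int) 1).map (fun i => (M : Int) ^ i.toNat)).reverse) c 0
          if PySem.Int.mod (PySem.Int.floordiv idx p) (M : Int) = (M : Int) - 1 then
            idx - ((M : Int) - 1) * p
          else idx + p))
      = (List.range (M ^ K)).map (pvRowA M K) := by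
  rw [pv_mpow_eq, PySem.List.pyRange_zero_nat (M ^ K), List.map_map]
  apply List.map_congr_left
  intro idx hidxmem
  have hidx : idx < M ^ K := List.mem_range.mp hidxmem
  rcases Nat.eq_zero_or_pos M with hM0 | hM
  · -- M = 0 forces K = 0 (otherwise range(M^K) is empty), and both rows are []
    have hK0 : K = 0 := by
      by_contra h
      rw [hM0, Nat.zero_pow (Nat.pos_of_ne_zero h)] at hidx
      omega
    subst hK0
    simp [pvRowA, PySem.List.pyRange_one_eq_nil]
  simp only [Function.comp]
  unfold pvRowA
  rw [PySem.List.pyRange_zero_nat K, List.map_map]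
  apply List.map_congr_left
  intro c hc
  have hcK : c < K := List.mem_range.mp hc
  simp only [Function.comp]
  have hp : PySem.List.pyGetD
      ((PySem.List.pyRange 0 (K : Int) 1).map (fun i => (M : Int) ^ ((K : Int) - 1 - i).toNat))
      ((c : Nat) : Int) 0 = ((M ^ (K - 1 - c) : Nat) : Int) := by
    rw [PySem.List.pyGetD_map_pyRange_of_nonneg _ _ _ _ (by positivity) (by exact_mod_cast hcK)]
    have : ((K : Int) - 1 - (c : Int)).toNat = K - 1 - c := by omega
    rw [this]; push_cast; ring
  rw [PySem.List.pyRange_zero_nat] at hp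
  rw [hp, PySem.Int.floordiv_natCast, PySem.Int.mod_natCast]
  set D : Nat := idx / M ^ (K - 1 - c) % M with hD
  have hDM : D < M := Nat.mod_lt _ hM
  by_cases h : D = M - 1
  · rw [if_pos (by omega), if_pos h]; push_cast; ring
  · rw [if_neg (by omega), if_neg h]; push_cast; ring

-- The recurrence B exploits: a (K+1)-digit row is a shifted K-digit row prefixed with
-- the increment-mod-M successor of the new leading digit.
theorem pv_rowA_rec (M K d r : Nat) (hd : d < M) (hr : r < M ^ K) :
    pvRowA M (K + 1) (d * M ^ K + r)
      = ((((d + 1) % M : Nat) : Int) * (M : Int) ^ K + (r : Int))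
          :: (pvRowA M K r).map (fun x => (d : Int) * (M : Int) ^ K + x) := by
  have hM : 0 < M := by omega
  have hpos : ∀ e : Nat, 0 < M ^ e := fun e => Nat.pow_pos hM
  unfold pvRowA
  rw [List.range_succ_eq_map, List.map_cons, List.map_map, List.map_map]
  congr 1
  · -- head: the new leading digit
    have hdiv : (d * M ^ K + r) / M ^ (K + 1 - 1 - 0) = d := by
      simp only [Nat.add_sub_cancel, Nat.sub_zero]
      rw [Nat.mul_comm d, Nat.mul_add_div (hpos K), Nat.div_eq_of_lt hr]; omega
    rw [hdiv, Nat.mod_eq_of_lt hd]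
    simp only [Nat.add_sub_cancel, Nat.sub_zero]
    by_cases h : d = M - 1
    · rw [if_pos h]
      have : (d + 1) % M = 0 := by
        have : d + 1 = M := by omega
        simp [this]
      rw [this]
      have hde : (d : Int) = (M : Int) - 1 := by omega
      push_cast
      rw [hde]; ring
    · rw [if_neg h]
      have : (d + 1) % M = d + 1 := Nat.mod_eq_of_lt (by omega)
      rw [this]; push_cast; ring
  · -- tail: the lower digits, shifted by d * M^K
    apply List.map_congr_left
    intro c hc
    have hcK : c < K := List.mem_range.mp hc
    simp only [Function.comp]
    have he : K + 1 - 1 - (c + 1) = K - 1 - c := by omega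
    rw [he]
    have hsplit : M ^ K = M ^ (c + 1) * M ^ (K - 1 - c) := by
      rw [← pow_add]; congr 1; omega
    have hdiv : (d * M ^ K + r) / M ^ (K - 1 - c)
        = d * M ^ (c + 1) + r / M ^ (K - 1 - c) := by
      rw [hsplit, ← Nat.mul_assoc, Nat.mul_comm (d * M ^ (c + 1)), Nat.mul_add_div (hpos _)]
    have hmod : (d * M ^ K + r) / M ^ (K - 1 - c) % M = r / M ^ (K - 1 - c) % M := by
      rw [hdiv]
      conv_lhs => rw [Nat.add_comm, pow_succ, ← Nat.mul_assoc]
      exact Nat.add_mul_mod_self_right _ _ _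
    rw [hmod]
    by_cases h : r / M ^ (K - 1 - c) % M = M - 1
    · rw [if_pos h, if_pos h]; push_cast; ring
    · rw [if_neg h, if_neg h]; push_cast; ring

theorem pv_range_mul (a b : Nat) :
    List.range (a * b) = (List.range a).flatMap (fun i => (List.range b).map (fun j => i * b + j)) := by
  induction a with
  | zero => simp
  | succ a ih =>
      rw [Nat.succ_mul, List.range_add, ih, List.range_succ, List.flatMap_append]
      simp [Nat.add_comm]

theorem pv_enum_map_range {α : Type} (K : Nat) :
    ∀ (g : Nat → α) (s : Int), PySem.List.enumerate ((List.range K).map g) s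
      = (List.range K).map (fun (i : Nat) => (s + (i : Int), g i)) := by
  induction K with
  | zero => intro g s; simp
  | succ K ih =>
      intro g s
      rw [List.range_succ_eq_map, List.map_cons, List.map_map, PySem.List.enumerate_cons,
        ih (g ∘ Nat.succ) (s + 1), List.map_cons, List.map_map]
      congr 1
      · simp
      · apply List.map_congr_left
        intro i _
        simp only [Function.comp]
        have : s + 1 + (i : Int) = s + ((i.succ : Nat) : Int) := by push_cast; ring
        rw [this]

-- B's fold builds exactly the list of pvRowA rows, together with n = M^K.
theorem pv_fold_arc (M K : Nat) :
    (PySem.List.pyRange 0 (K : Int) 1).foldl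
        (fun st (_ : Int) =>
          ((PySem.List.pyRange 0 (M : Int) 1).flatMap (fun d =>
            (PySem.List.enumerate st.1 0).map (fun rrow =>
              (PySem.Int.mod (d + 1) (M : Int) * st.2 + rrow.1)
                :: rrow.2.map (fun x => d * st.2 + x))),
           st.2 * (M : Int)))
        ([([] : List Int)], (1 : Int))
      = ((List.range (M ^ K)).map (pvRowA M K), ((M ^ K : Nat) : Int)) := by
  rw [PySem.List.pyRange_zero_nat K, List.foldl_map]
  induction K with
  | zero => simp [pvRowA]
  | succ K ih =>
      rw [List.range_succ, List.foldl_append, ih]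
      simp only [List.foldl_cons, List.foldl_nil, Prod.mk.injEq]
      constructor
      · -- the arc table component
        rw [PySem.List.pyRange_zero_nat M, List.flatMap_map, pv_enum_map_range (M ^ K) (pvRowA M K) 0]
        have hpow : M ^ (K + 1) = M * M ^ K := by ring
        rw [hpow, pv_range_mul, List.map_flatMap]
        apply List.flatMap_congr
        intro d hd
        have hdM : d < M := List.mem_range.mp hd
        rw [List.map_map, List.map_map]
        apply List.map_congr_left
        intro r hr
        have hrK : r < M ^ K := List.mem_range.mp hr
        simp only [Function.comp]
        rw [pv_rowA_rec M K d r hdM hrK]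
        have hmod : PySem.Int.mod ((d : Int) + 1) (M : Int) = (((d + 1) % M : Nat) : Int) := by
          have : (d : Int) + 1 = ((d + 1 : Nat) : Int) := by push_cast; ring
          rw [this, PySem.Int.mod_natCast]
        rw [hmod]
        simp
      · push_cast; ring

-- ----- permutation-inverse tables -----

-- The scatter fold preserves the row length.
theorem pv_scatter_length (p : List Int) :
    ∀ (s : Int) (init : List Int),
      ((PySem.List.enumerate p s).foldl (fun row ac => PySem.List.pySetD row ac.2 ac.1) init).length
        = init.length := by
  induction p with
  | nil => intro s init; simp [PySem.List.enumerate]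
  | cons a t ih =>
      intro s init
      rw [PySem.List.enumerate_cons]
      simp only [List.foldl_cons]
      rw [ih]
      exact PySem.List.length_pySetD _ _ _

-- Cells whose symbol does not occur in p keep their initial value.
theorem pv_scatter_notmem (p : List Int) :
    ∀ (s : Int) (init : List Int),
      (∀ x ∈ p, ∃ ca : Nat, ca < init.length ∧ x = (ca : Int)) →
      ∀ c : Nat, (c : Int) ∉ p →
        ((PySem.List.enumerate p s).foldl (fun row ac => PySem.List.pySetD row ac.2 ac.1) init)[c]?
          = init[c]? := by
  induction p with
  | nil => intro s init _ c _; simp [PySem.List.enumerate]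
  | cons a t ih =>
      intro s init hval c hc
      rw [PySem.List.enumerate_cons]
      simp only [List.foldl_cons]
      obtain ⟨ca, hca, rfl⟩ := hval a (by simp)
      have hne : ca ≠ c := by
        intro h; exact hc (by simp [h])
      rw [ih (s + 1) _ ?_ c (fun h => hc (List.mem_cons_of_mem _ h))]
      · rw [PySem.List.pySetD_natCast]
        exact List.getElem?_set_ne (by omega)
      · intro x hx
        obtain ⟨cb, hcb, rfl⟩ := hval x (List.mem_cons_of_mem _ hx)
        exact ⟨cb, by rw [PySem.List.pySetD_natCast]; simpa using hcb, rfl⟩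

-- The cell of symbol c ends up holding s + (position of c in p), provided c occurs
-- exactly once (Nodup) and every entry of p is a valid cell index.
theorem pv_scatter_index (p : List Int) :
    ∀ (s : Nat) (init : List Int), p.Nodup →
      (∀ x ∈ p, ∃ ca : Nat, ca < init.length ∧ x = (ca : Int)) →
      ∀ (c j : Nat), PySem.List.index? p (c : Int) = some j →
        ((PySem.List.enumerate p (s : Int)).foldl
            (fun row ac => PySem.List.pySetD row ac.2 ac.1) init)[c]?
          = some ((s + j : Nat) : Int) := by
  induction p with
  | nil => intro s init _ _ c j h; simp [PySem.List.index?] at h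
  | cons a t ih =>
      intro s init hnd hval c j hidx
      rw [PySem.List.enumerate_cons]
      simp only [List.foldl_cons]
      by_cases hac : a = (c : Int)
      · subst hac
        rw [PySem.List.index?_cons_self] at hidx
        have hj0 : j = 0 := (Option.some.inj hidx).symm
        subst hj0
        obtain ⟨ca, hca, hcae⟩ := hval ((c : Int)) (by simp)
        have hceq : c = ca := by exact_mod_cast hcae
        subst hceq
        have hnotmem : (c : Int) ∉ t := (List.nodup_cons.mp hnd).1
        rw [pv_scatter_notmem t ((s : Int) + 1) _ ?_ c hnotmem]
        · rw [PySem.List.pySetD_natCast]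
          rw [List.getElem?_set_self (by omega)]
          simp
        · intro x hx
          obtain ⟨cb, hcb, rfl⟩ := hval x (List.mem_cons_of_mem _ hx)
          exact ⟨cb, by rw [PySem.List.pySetD_natCast]; simpa using hcb, rfl⟩
      · rw [PySem.List.index?_cons_of_ne t hac] at hidx
        obtain ⟨j', hj', rfl⟩ : ∃ j', PySem.List.index? t (c : Int) = some j' ∧ j = j' + 1 := by
          cases h : PySem.List.index? t (c : Int) with
          | none => rw [h] at hidx; simp at hidx
          | some v => rw [h] at hidx; simp at hidx; exact ⟨v, rfl, hidx.symm⟩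
        have hs1 : (s : Int) + 1 = ((s + 1 : Nat) : Int) := by push_cast; ring
        rw [hs1, ih (s + 1) _ (List.nodup_cons.mp hnd).2 ?_ c j' hj']
        · congr 1; push_cast; ring
        · intro x hx
          obtain ⟨cb, hcb, rfl⟩ := hval x (List.mem_cons_of_mem _ hx)
          obtain ⟨ca, hca, rfl⟩ := hval a (by simp)
          exact ⟨cb, by rw [PySem.List.pySetD_natCast]; simpa using hcb, rfl⟩

-- For p a permutation of range(K), A's scatter row equals B's index-search row.
theorem pv_pa_eq (K : Nat) (p : List Int)
    (hperm : p.Perm ((PySem.List.pyRange 0 (K : Int) 1))) :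
    (PySem.List.enumerate p 0).foldl (fun row ac => PySem.List.pySetD row ac.2 ac.1)
        (List.replicate K (0 : Int))
      = (PySem.List.pyRange 0 (K : Int) 1).map
          (fun c => (((PySem.List.index? p c).getD 0 : Nat) : Int)) := by
  have hrange := PySem.List.pyRange_zero_nat K
  have hnd : p.Nodup := by
    refine hperm.nodup_iff.mpr ?_
    rw [hrange]
    exact List.Nodup.map (fun a b h => by exact_mod_cast h) List.nodup_range
  have hval : ∀ x ∈ p, ∃ ca : Nat, ca < (List.replicate K (0 : Int)).length ∧ x = (ca : Int) := by
    intro x hx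
    have hx' : x ∈ List.map (fun (i : Nat) => (i : Int)) (List.range K) := by
      rw [← hrange]; exact hperm.mem_iff.mp hx
    obtain ⟨i, hi, rfl⟩ := List.mem_map.mp hx'
    exact ⟨i, by simpa using List.mem_range.mp hi, rfl⟩
  have hmem : ∀ c : Nat, c < K → (c : Int) ∈ p := by
    intro c hc
    apply hperm.mem_iff.mpr
    rw [hrange]
    exact List.mem_map.mpr ⟨c, List.mem_range.mpr hc, rfl⟩
  apply List.ext_getElem?
  intro c
  by_cases hcK : c < K
  · obtain ⟨j, hj⟩ : ∃ j, PySem.List.index? p (c : Int) = some j := by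
      cases h : PySem.List.index? p (c : Int) with
      | none => exact absurd (hmem c hcK) ((PySem.List.index?_eq_none_iff p ((c : Nat) : Int)).mp h)
      | some v => exact ⟨v, rfl⟩
    have hres := pv_scatter_index p 0 (List.replicate K (0 : Int)) hnd hval c j hj
    simp only [Nat.cast_zero, Nat.zero_add] at hres
    rw [hres, hrange, List.map_map, List.getElem?_map, List.getElem?_range hcK]
    rw [PySem.List.index?_eq_idxOf?] at hj
    simp [hj]
  · have hlen1 : ((PySem.List.enumerate p 0).foldl
        (fun row ac => PySem.List.pySetD row ac.2 ac.1) (List.replicate K (0 : Int))).length = K := by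
      rw [pv_scatter_length]; simp
    rw [List.getElem?_eq_none (by omega), List.getElem?_eq_none (by simp [hrange]; omega)]

-- main equality
theorem pv_main_eq (m k : Int) (hm : 0 ≤ m) (hk : 0 ≤ k) :
    build_sa_py m k = build_sa_py_alt m k := by
  obtain ⟨M, rfl⟩ : ∃ M : Nat, m = (M : Int) := ⟨m.toNat, by omega⟩
  obtain ⟨K, rfl⟩ : ∃ K : Nat, k = (K : Int) := ⟨k.toNat, by omega⟩
  unfold build_sa_py build_sa_py_alt
  rw [if_neg (by omega)]
  simp only [Int.toNat_natCast]
  rw [pv_fold_arc M K]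
  simp only [Prod.mk.injEq]
  refine ⟨by push_cast; ring, ?_, ?_, trivial⟩
  · -- arc component
    have hpow : ((M : Int)) ^ K = ((M ^ K : Nat) : Int) := by push_cast; ring
    rw [hpow]
    exact pv_arcA_eq M K
  · -- pa component
    apply List.map_congr_left
    intro p hp
    have hperm := PySem.List.perm_of_mem_permutations hp
    exact pv_pa_eq K p hperm

-- ===== VERDICT (by name: the statement is the Claim_ definition above) =====
theorem build_sa_py_spec : Claim_equal_build_sa_py := by
  intro m k _ hpre
  exact pv_main_eq m k hpre.1 hpre.2
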